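-- pv_equiv track=rewrite | github.com/prettypositive/aoc2020 | day 16/16-2.py | remove_invalid_tickets
-- ===== SOURCE A (Python) =====
-- def remove_invalid_tickets(tickets, rules):
--     all_valid_numbers = set()
--     for x in rules.values():
--         all_valid_numbers.update(x)
--
--     for ticket in tickets[:]:
--         for value in ticket:
--             if value not in all_valid_numbers:
--                 tickets.remove(ticket)
--                 break
--
--     return tickets
-- ===== SOURCE B (Python) =====
-- def remove_invalid_tickets(tickets, rules):
--     survivors = []
--     for ticket in tickets:
--         if all(any(v in r for r in rules.values()) for v in ticket):
--             survivors.append(ticket)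
--     tickets[:] = survivors
--     return tickets
-- ===== Notes on version B (the rewrite author's own statement) =====
-- stated objective: simpler
-- what changed: A builds a union set of all valid numbers and then deletes offending tickets from the list in place one remove() at a time; B makes a single filtering pass that checks each value directly against the rule collections and writes the survivors back with a slice assignment.
import Mathlib
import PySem

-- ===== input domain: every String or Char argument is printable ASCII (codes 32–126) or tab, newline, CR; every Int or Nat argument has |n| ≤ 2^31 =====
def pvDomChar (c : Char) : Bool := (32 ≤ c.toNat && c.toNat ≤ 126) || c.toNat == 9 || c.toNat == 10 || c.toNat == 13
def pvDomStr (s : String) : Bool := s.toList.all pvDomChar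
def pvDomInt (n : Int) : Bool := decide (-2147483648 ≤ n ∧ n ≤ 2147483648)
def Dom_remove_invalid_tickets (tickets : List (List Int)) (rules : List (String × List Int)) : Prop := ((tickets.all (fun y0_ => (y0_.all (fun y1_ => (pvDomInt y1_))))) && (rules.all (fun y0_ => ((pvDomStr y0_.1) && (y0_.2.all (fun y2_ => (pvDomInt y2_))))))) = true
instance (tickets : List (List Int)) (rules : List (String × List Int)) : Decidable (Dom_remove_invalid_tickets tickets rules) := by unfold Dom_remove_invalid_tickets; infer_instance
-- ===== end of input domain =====

-- B replaces A's "build a union set, then delete bad tickets in place" by a single filtering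
-- pass checking each value directly against the rule collections; B performs the same in-place
-- mutation (slice assignment) and returns the same object, so return value and side effect match.


-- ===== PORT A =====
-- inner loop of A: 'for value in ticket: if value not in all_valid_numbers: … break'
def pvTicketHasInvalid (s : PySem.Set Int) : List Int → Bool
  | [] => false
  | v :: vs => if !(PySem.Set.contains s v) then true else pvTicketHasInvalid s vs

-- outer loop of A over the copy tickets[:], with tickets.remove(ticket) on the current list
def pvRemoveLoop (s : PySem.Set Int) : List (List Int) → List (List Int) → List (List Int)
  | [], cur => cur
  | t :: rest, cur =>
      if pvTicketHasInvalid s t then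
        pvRemoveLoop s rest ((PySem.List.remove? cur t).getD cur)
      else
        pvRemoveLoop s rest cur

def remove_invalid_tickets (tickets : List (List Int)) (rules : List (String × List Int)) : List (List Int) :=
  let allValid := rules.foldl (fun s p => PySem.Set.update s p.2) PySem.Set.empty
  pvRemoveLoop allValid tickets tickets

-- ===== PORT B =====
def remove_invalid_tickets_alt (tickets : List (List Int)) (rules : List (String × List Int)) : List (List Int) :=
  tickets.filter (fun t => t.all (fun v => rules.any (fun p => p.2.contains v)))

-- ===== PRECONDITION & SPEC =====
def Spec_remove_invalid_tickets (tickets : List (List Int)) (rules : List (String × List Int)) (out : List (List Int)) : Prop := out = remove_invalid_tickets_alt tickets rules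
instance (tickets : List (List Int)) (rules : List (String × List Int)) (out : List (List Int)) : Decidable (Spec_remove_invalid_tickets tickets rules out) := by unfold Spec_remove_invalid_tickets; infer_instance

-- ===== CLAIM (what is proved, stated in full; the proofs are below) =====
def Claim_equal_remove_invalid_tickets : Prop := ∀ (tickets : List (List Int)) (rules : List (String × List Int)), Dom_remove_invalid_tickets tickets rules → Spec_remove_invalid_tickets tickets rules (remove_invalid_tickets tickets rules)

-- ===== LEMMAS AND PROOFS =====

theorem pvTicketHasInvalid_eq (s : PySem.Set Int) (t : List Int) :
    pvTicketHasInvalid s t = !(t.all (fun v => PySem.Set.contains s v)) := by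
  induction t with
  | nil => simp [pvTicketHasInvalid]
  | cons v vs ih =>
      simp only [pvTicketHasInvalid, List.all_cons, ih]
      cases h : PySem.Set.contains s v <;> simp

theorem pvRemove_getD_eq_erase (cur : List (List Int)) (t : List Int) :
    (PySem.List.remove? cur t).getD cur = cur.erase t := by
  by_cases h : t ∈ cur
  · rw [PySem.List.remove?_eq_some_erase cur t h]; rfl
  · rw [(PySem.List.remove?_eq_none_iff cur t).mpr h, List.erase_of_not_mem h]; rfl

-- removing a bad element never touches a good head
theorem pvRemoveLoop_good_head (s : PySem.Set Int) (l : List (List Int)) (t : List Int)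
    (cur : List (List Int)) (ht : pvTicketHasInvalid s t = false) :
    pvRemoveLoop s l (t :: cur) = t :: pvRemoveLoop s l cur := by
  induction l generalizing cur with
  | nil => rfl
  | cons u rest ih =>
      by_cases hu : pvTicketHasInvalid s u = true
      · have hne : (t == u) = false := by
          simp only [beq_eq_false_iff_ne]
          intro hEq; rw [hEq] at ht; rw [ht] at hu; exact Bool.false_ne_true hu
        simp only [pvRemoveLoop, hu, if_true, pvRemove_getD_eq_erase, List.erase_cons, hne,
          Bool.false_eq_true, if_false, ih]
      · have hu' : pvTicketHasInvalid s u = false := Bool.eq_false_iff.mpr hu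
        simp only [pvRemoveLoop, hu', Bool.false_eq_true, if_false, ih]

theorem pvRemoveLoop_self (s : PySem.Set Int) (l : List (List Int)) :
    pvRemoveLoop s l l = l.filter (fun t => !(pvTicketHasInvalid s t)) := by
  induction l with
  | nil => rfl
  | cons t rest ih =>
      by_cases ht : pvTicketHasInvalid s t = true
      · simp only [pvRemoveLoop, ht, if_true, pvRemove_getD_eq_erase, List.erase_cons_head,
          List.filter_cons, Bool.not_true, Bool.false_eq_true, if_false, ih]
      · have ht' : pvTicketHasInvalid s t = false := Bool.eq_false_iff.mpr ht
        simp only [pvRemoveLoop, ht', Bool.false_eq_true, if_false, List.filter_cons,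
          pvRemoveLoop_good_head s rest t rest ht', ih, Bool.not_false, if_true]

theorem pvMem_foldl_update (rules : List (String × List Int)) (s : PySem.Set Int) (v : Int) :
    v ∈ rules.foldl (fun s p => PySem.Set.update s p.2) s ↔ v ∈ s ∨ ∃ p ∈ rules, v ∈ p.2 := by
  induction rules generalizing s with
  | nil => simp
  | cons p rest ih =>
      simp only [List.foldl_cons, ih, PySem.Set.mem_update, List.mem_cons]
      constructor
      · rintro (⟨h | h⟩ | ⟨q, hq, hv⟩)
        · exact Or.inl h
        · exact Or.inr ⟨p, Or.inl rfl, h⟩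
        · exact Or.inr ⟨q, Or.inr hq, hv⟩
      · rintro (h | ⟨q, (rfl | hq), hv⟩)
        · exact Or.inl (Or.inl h)
        · exact Or.inl (Or.inr hv)
        · exact Or.inr ⟨q, hq, hv⟩

theorem pvGood_eq (rules : List (String × List Int)) (t : List Int) :
    (!(pvTicketHasInvalid (rules.foldl (fun s p => PySem.Set.update s p.2) PySem.Set.empty) t))
      = t.all (fun v => rules.any (fun p => p.2.contains v)) := by
  rw [pvTicketHasInvalid_eq, Bool.not_not]
  apply List.all_congr rfl
  intro v
  rw [Bool.eq_iff_iff]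
  simp only [PySem.Set.contains_iff, pvMem_foldl_update, PySem.Set.empty, List.not_mem_nil,
    false_or, List.any_eq_true, List.contains_iff_mem]

-- ===== VERDICT (by name: the statement is the Claim_ definition above) =====
theorem remove_invalid_tickets_spec : Claim_equal_remove_invalid_tickets := by
  intro tickets rules _
  show remove_invalid_tickets tickets rules = remove_invalid_tickets_alt tickets rules
  unfold remove_invalid_tickets remove_invalid_tickets_alt
  rw [pvRemoveLoop_self]
  exact List.filter_congr fun t _ => pvGood_eq rules t
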